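-- pv_equiv track=rewrite | github.com/yesdeepakmittal/interview-corner | GeeksforGeeks/SwapOddEven.py | swapBits
-- ===== SOURCE A (Python) =====
-- def swapBits(n):
--     #Your code here
--     # 00010111
--     # 00101011
--     ans = ''
--     num = bin(n)[2:]
--     if len(num)%2 != 0:
--         num = '0' + num
--     for i in range(0,len(num),2):
--     	ans += num[i+1]
--     	ans += num[i]
--     return int(ans,base=2)
-- ===== SOURCE B (Python) =====
-- def swapBits(n):
--     # Arithmetic base-4 digit swap: no string conversion, no indexing (objective: alternative).
--     res, p = 0, 1
--     while n > 0:
--         n, d = divmod(n, 4)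
--         res += (2 * (d % 2) + d // 2) * p
--         p *= 4
--     return res
-- ===== Notes on version B (the rewrite author's own statement) =====
-- stated objective: alternative
-- what changed: Replaces binary-string formatting, per-pair string concatenation and int(...,2) re-parsing with a pure arithmetic loop over base-4 digits (each digit 2a+b becomes 2b+a); string handling disappears entirely.
import Mathlib
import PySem

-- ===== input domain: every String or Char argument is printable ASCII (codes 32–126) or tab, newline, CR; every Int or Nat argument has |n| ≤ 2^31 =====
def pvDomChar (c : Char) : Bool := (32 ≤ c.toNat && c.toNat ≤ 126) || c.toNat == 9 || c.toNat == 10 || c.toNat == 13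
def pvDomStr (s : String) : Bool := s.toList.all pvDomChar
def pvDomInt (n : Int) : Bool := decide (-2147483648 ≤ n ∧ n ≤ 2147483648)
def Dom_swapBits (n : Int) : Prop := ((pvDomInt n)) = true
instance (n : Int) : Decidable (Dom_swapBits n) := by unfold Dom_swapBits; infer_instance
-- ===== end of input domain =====

-- B replaces A's string formatting / pair-swapping concatenation / int(...,2) parse by a
-- pure arithmetic loop over base-4 digits (objective: alternative, no string handling).

-- ===== PORT A =====
-- bin(m)[2:] for m > 0 (most-significant bit first)
def pvBinGo (m : Nat) : List Char :=
  if m = 0 then [] else pvBinGo (m / 2) ++ [if m % 2 = 1 then '1' else '0']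

-- `for i in range(0, len(num), 2): ans += num[i+1]; ans += num[i]` — the obvious
-- recursion over the loop index; num has even length so both indices are in range,
-- where `num.getD _ ' '` is exact for Python's num[i+1], num[i].
def pvLoopA (num : List Char) (i : Nat) (ans : List Char) : List Char :=
  if i < num.length then
    pvLoopA num (i + 2) (ans ++ [num.getD (i + 1) ' ', num.getD i ' '])
  else ans
termination_by num.length - i
decreasing_by omega

-- int(ans, base=2); exact on '0'/'1' strings, which ans always is
def pvParseBin (l : List Char) : Int :=
  l.foldl (fun a c => 2 * a + (if c = '1' then 1 else 0)) 0

def swapBits (n : Int) : Int :=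
  let num := if n.toNat = 0 then ['0'] else pvBinGo n.toNat  -- bin(n)[2:]; Pre_ excludes n < 0, where Python raises ValueError
  let num := if num.length % 2 ≠ 0 then '0' :: num else num
  pvParseBin (pvLoopA num 0 [])

-- ===== PORT B =====
-- while n > 0: n, d = divmod(n, 4); res += (2*(d%2) + d//2)*p; p *= 4
def pvAltGo (n p res : Int) : Int :=
  if h : 0 < n then
    let d := PySem.Int.mod n 4
    pvAltGo (PySem.Int.floordiv n 4) (p * 4) (res + (2 * PySem.Int.mod d 2 + PySem.Int.floordiv d 2) * p)
  else res
termination_by n.toNat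
decreasing_by
  rw [PySem.Int.floordiv_eq_ediv_of_pos (by omega)]
  omega

def swapBits_alt (n : Int) : Int := pvAltGo n 1 0

-- ===== PRECONDITION & SPEC =====
-- Pre_ excludes exactly n < 0, where Python A raises ValueError (bin(-x)[2:] keeps a 'b').
def Pre_swapBits (n : Int) : Prop := 0 ≤ n
instance (n : Int) : Decidable (Pre_swapBits n) := by unfold Pre_swapBits; infer_instance
def pvWitness_swapBits : Int := (23)

def Spec_swapBits (n : Int) (out : Int) : Prop := out = swapBits_alt n
instance (n : Int) (out : Int) : Decidable (Spec_swapBits n out) := by unfold Spec_swapBits; infer_instance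

-- ===== CLAIM (what is proved, stated in full; the proofs are below) =====
def Claim_equal_swapBits : Prop := ∀ (n : Int), Dom_swapBits n → Pre_swapBits n → Spec_swapBits n (swapBits n)

-- ===== LEMMAS AND PROOFS =====

-- the pair-digit swap, as a Nat map: base-4 digit 2a+b ↦ 2b+a
def pvFSwap (m : Nat) : Nat :=
  if m = 0 then 0 else 4 * pvFSwap (m / 4) + (2 * (m % 4 % 2) + m % 4 / 2)

theorem pvFSwap_eq (m : Nat) : pvFSwap m = 4 * pvFSwap (m / 4) + (2 * (m % 4 % 2) + m % 4 / 2) := by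
  rw [pvFSwap]
  split
  · subst ‹m = 0›; simp [pvFSwap]
  · rfl

-- value (MSB first) of a bit string
def pvVal (l : List Char) : Nat :=
  l.foldl (fun a c => 2 * a + (if c = '1' then 1 else 0)) 0

def pvValGo (l : List Char) (a : Nat) : Nat :=
  l.foldl (fun a c => 2 * a + (if c = '1' then 1 else 0)) a

theorem pvValGo_eq (l : List Char) : ∀ a, pvValGo l a = a * 2 ^ l.length + pvVal l := by
  induction l with
  | nil => intro a; simp [pvValGo, pvVal]
  | cons c t ih =>
    intro a
    simp only [pvValGo, pvVal, List.foldl_cons, List.length_cons] at *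
    rw [ih, ih (2 * 0 + _)]
    ring

theorem pvVal_append (p t : List Char) : pvVal (p ++ t) = pvVal p * 2 ^ t.length + pvVal t := by
  show pvValGo (p ++ t) 0 = _
  rw [show pvValGo (p ++ t) 0 = pvValGo t (pvValGo p 0) from by simp [pvValGo]]
  rw [pvValGo_eq]; rfl

def pvBits (l : List Char) : Prop := ∀ c ∈ l, c = '0' ∨ c = '1'

theorem pvVal_cons2 (c1 c2 : Char) (t : List Char) :
    pvVal (c1 :: c2 :: t) =
      ((if c1 = '1' then 1 else 0) * 2 + (if c2 = '1' then 1 else 0)) * 2 ^ t.length + pvVal t := by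
  rw [show c1 :: c2 :: t = [c1, c2] ++ t from rfl, pvVal_append]
  simp only [pvVal, List.foldl_cons, List.foldl_nil]
  ring_nf

theorem pvBinGo_bits (m : Nat) : pvBits (pvBinGo m) := by
  induction m using Nat.strong_induction_on with
  | _ m ih =>
    rw [pvBinGo]
    split
    · intro c hc; simp at hc
    · intro c hc
      rcases List.mem_append.1 hc with h | h
      · exact ih (m / 2) (by omega) c h
      · simp at h; subst h; split <;> simp

theorem pvBinGo_val (m : Nat) : pvVal (pvBinGo m) = m := by
  induction m using Nat.strong_induction_on with
  | _ m ih =>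
    rw [pvBinGo]
    split
    · simp [pvVal]; omega
    · rw [pvVal_append, ih (m / 2) (by omega)]
      simp only [pvVal, List.foldl_cons, List.foldl_nil, List.length_cons, List.length_nil]
      have h2 : m % 2 = 0 ∨ m % 2 = 1 := by omega
      rcases h2 with h2 | h2 <;> simp [h2] <;> omega

theorem pvVal_lt (l : List Char) : pvVal l < 2 ^ l.length := by
  induction l using List.reverseRecOn with
  | nil => simp [pvVal]
  | append_singleton t c ih =>
    rw [pvVal_append]
    have hc : pvVal [c] ≤ 1 := by
      simp only [pvVal, List.foldl_cons, List.foldl_nil]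
      split <;> omega
    simp only [List.length_append, List.length_cons, List.length_nil, pow_succ]
    omega

theorem pvFSwap_zero : pvFSwap 0 = 0 := by
  rw [pvFSwap]
  simp

-- digit lemma: pvFSwap maps base-4 digits independently
theorem pvFSwap_digit (k : Nat) : ∀ d m, d < 4 → m < 4 ^ k →
    pvFSwap (d * 4 ^ k + m) = (2 * (d % 2) + d / 2) * 4 ^ k + pvFSwap m := by
  induction k with
  | zero =>
    intro d m hd hm
    have hm0 : m = 0 := by omega
    subst hm0
    rw [pow_zero, mul_one, add_zero, pvFSwap_eq d, pvFSwap_zero,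
      show d / 4 = 0 from by omega, pvFSwap_zero]
    omega
  | succ k ih =>
    intro d m hd hm
    have e1 : (d * 4 ^ (k + 1) + m) / 4 = d * 4 ^ k + m / 4 := by
      rw [pow_succ, ← mul_assoc, add_comm, Nat.add_mul_div_right _ _ (by norm_num : 0 < 4)]
      omega
    have e2 : (d * 4 ^ (k + 1) + m) % 4 = m % 4 := by
      rw [pow_succ, ← mul_assoc, add_comm, Nat.add_mul_mod_self_right]
    rw [pvFSwap_eq (d * 4 ^ (k + 1) + m), e1, e2,
        ih d (m / 4) hd (by rw [pow_succ] at hm; omega), pvFSwap_eq m]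
    ring

-- the pair-swapped list, structurally
def pvSwapPairs : List Char → List Char
  | a :: b :: t => b :: a :: pvSwapPairs t
  | l => l

theorem pvSwapPairs_length (l : List Char) : (pvSwapPairs l).length = l.length := by
  induction l using pvSwapPairs.induct with
  | case1 a b t ih => simp [pvSwapPairs, ih]
  | case2 l h => simp [pvSwapPairs]

theorem pvLoopA_eq (k : Nat) : ∀ (l : List Char) (i : Nat) (ans : List Char),
    l.length = i + 2 * k → pvLoopA l i ans = ans ++ pvSwapPairs (l.drop i) := by
  induction k with
  | zero =>
    intro l i ans h
    rw [pvLoopA]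
    simp only [if_neg (by omega : ¬ i < l.length)]
    rw [List.drop_of_length_le (by omega)]
    simp [pvSwapPairs]
  | succ k ih =>
    intro l i ans h
    rw [pvLoopA]
    simp only [if_pos (by omega : i < l.length)]
    rw [ih l (i + 2) _ (by omega)]
    have hd : l.drop i = l.getD i ' ' :: l.getD (i + 1) ' ' :: l.drop (i + 2) := by
      have h1 : i < l.length := by omega
      have h2 : i + 1 < l.length := by omega
      apply List.ext_getElem?
      intro j
      rcases j with _ | _ | j
      · simp [List.getElem?_drop, List.getD_eq_getElem?_getD, List.getElem?_eq_getElem h1]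
      · simp [List.getElem?_drop, List.getD_eq_getElem?_getD, List.getElem?_eq_getElem h2,
          show i + 1 = i + (0 + 1) by omega]
      · simp only [List.getElem?_drop, List.getElem?_cons_succ]
        congr 1
        omega
    rw [hd]
    simp [pvSwapPairs]
  -- `List.getElem?_drop : (l.drop i)[j]? = l[i + j]?`

theorem pvSwapPairs_val (k : Nat) : ∀ l : List Char, pvBits l → l.length = 2 * k →
    pvVal (pvSwapPairs l) = pvFSwap (pvVal l) := by
  induction k with
  | zero =>
    intro l _ h
    have : l = [] := List.eq_nil_of_length_eq_zero (by omega)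
    subst this
    simp [pvSwapPairs, pvVal, pvFSwap]
  | succ k ih =>
    intro l hb h
    match l, h with
    | a :: b :: t, h =>
      have ht : t.length = 2 * k := by simp at h; omega
      have hbt : pvBits t := fun c hc => hb c (by simp [hc])
      have ha : a = '0' ∨ a = '1' := hb a (by simp)
      have hbb : b = '0' ∨ b = '1' := hb b (by simp)
      have hlt : pvVal t < 4 ^ k := by
        have := pvVal_lt t
        rw [ht] at this
        calc pvVal t < 2 ^ (2 * k) := this
          _ = 4 ^ k := by rw [show (4:Nat) = 2^2 by norm_num, ← pow_mul]
      show pvVal (b :: a :: pvSwapPairs t) = pvFSwap (pvVal (a :: b :: t))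
      rw [pvVal_cons2 b a (pvSwapPairs t), pvVal_cons2 a b t, pvSwapPairs_length, ht,
        ih t hbt ht,
        show (2:Nat) ^ (2 * k) = 4 ^ k by rw [show (4:Nat) = 2^2 by norm_num, ← pow_mul],
        pvFSwap_digit k _ (pvVal t)
          (by rcases ha with rfl | rfl <;> rcases hbb with rfl | rfl <;> decide) hlt]
      have c01 : (('0' : Char) = '1') = False := eq_false (by decide)
      rcases ha with rfl | rfl <;> rcases hbb with rfl | rfl <;>
        simp only [c01, if_true, if_false]

-- pvParseBin agrees with pvVal
theorem pvParseBin_eq (l : List Char) : pvParseBin l = (pvVal l : Int) := by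
  suffices h : ∀ a : Nat, l.foldl (fun a c => 2 * a + (if c = '1' then 1 else 0)) (a : Int)
      = ((pvValGo l a : Nat) : Int) by
    simpa [pvParseBin, pvVal, pvValGo] using h 0
  induction l with
  | nil => intro a; simp [pvValGo]
  | cons c t ih =>
    intro a
    simp only [List.foldl_cons, pvValGo, List.foldl_cons] at *
    have : (2 * (a : Int) + (if c = '1' then 1 else 0))
        = ((2 * a + (if c = '1' then 1 else 0) : Nat) : Int) := by
      push_cast
      split <;> simp
    rw [this, ih]

-- B's loop computes pvFSwap
theorem pvAltGo_eq (N : Nat) : ∀ p res : Int, pvAltGo (N : Int) p res = res + p * pvFSwap N := by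
  induction N using Nat.strong_induction_on with
  | _ N ih =>
    intro p res
    rw [pvAltGo]
    by_cases hN : 0 < N
    · rw [dif_pos (by exact_mod_cast hN)]
      have hfd : PySem.Int.floordiv (N : Int) 4 = ((N / 4 : Nat) : Int) := by
        rw [PySem.Int.floordiv_eq_ediv_of_pos (by omega)]
        omega
      have hmd : PySem.Int.mod (N : Int) 4 = ((N % 4 : Nat) : Int) := by
        rw [PySem.Int.mod_eq_emod_of_pos (by omega)]
        omega
      have hmd2 : PySem.Int.mod ((N % 4 : Nat) : Int) 2 = ((N % 4 % 2 : Nat) : Int) := by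
        rw [PySem.Int.mod_eq_emod_of_pos (by omega)]
        omega
      have hfd2 : PySem.Int.floordiv ((N % 4 : Nat) : Int) 2 = ((N % 4 / 2 : Nat) : Int) := by
        rw [PySem.Int.floordiv_eq_ediv_of_pos (by omega)]
        omega
      simp only [hfd, hmd, hmd2, hfd2]
      rw [ih (N / 4) (by omega)]
      rw [pvFSwap_eq N]
      push_cast
      ring
    · rw [dif_neg (by omega : ¬ (0:Int) < (N : Int))]
      have : N = 0 := by omega
      subst this
      simp [pvFSwap]
  -- termination handled in the definition

-- pad preserves value and bits
theorem pvVal_cons_zero (l : List Char) : pvVal ('0' :: l) = pvVal l := by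
  simp only [pvVal, List.foldl_cons]
  rw [if_neg (by decide : ¬ ('0' : Char) = '1')]

-- ===== VERDICT (by name: the statement is the Claim_ definition above) =====
theorem swapBits_spec : Claim_equal_swapBits := by
  intro n _ hpre
  unfold Spec_swapBits swapBits swapBits_alt
  obtain ⟨N, rfl⟩ : ∃ N : Nat, n = (N : Int) :=
    ⟨n.toNat, by unfold Pre_swapBits at hpre; omega⟩
  rw [pvAltGo_eq N 1 0]
  simp only [Int.toNat_natCast]
  by_cases h0 : N = 0
  · subst h0
    rw [if_pos rfl]
    norm_num
    rw [pvLoopA_eq 1 ['0', '0'] 0 [] (by simp)]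
    simp [pvSwapPairs, pvParseBin, pvFSwap_zero]
  · rw [if_neg h0]
    set num0 := pvBinGo N with hnum0
    set num := if num0.length % 2 ≠ 0 then '0' :: num0 else num0 with hnum
    have hbits : pvBits num := by
      rw [hnum]
      split
      · intro c hc
        rcases List.mem_cons.1 hc with h | h
        · left; exact h
        · exact pvBinGo_bits N c h
      · exact pvBinGo_bits N
    have hvalnum : pvVal num = N := by
      rw [hnum]
      split
      · rw [pvVal_cons_zero, hnum0, pvBinGo_val]
      · rw [hnum0, pvBinGo_val]
    have heven : num.length % 2 = 0 := by
      rw [hnum]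
      split
      · simp only [List.length_cons]; omega
      · omega
    obtain ⟨k, hk⟩ : ∃ k, num.length = 2 * k := ⟨num.length / 2, by omega⟩
    rw [pvLoopA_eq k num 0 [] (by omega)]
    simp only [List.drop_zero, List.nil_append]
    rw [pvParseBin_eq, pvSwapPairs_val k num hbits hk, hvalnum]
    simp
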